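-- pv_equiv track=rewrite | github.com/pk-pythondeveloper/Python-IMP-questions | match statment.py | manage_seating
-- ===== SOURCE A (Python) =====
-- def manage_seating(persons):
--     n = len(persons)
--     chairs = [''] * n
--     chairs[0] = persons[0]
--     left, right = 1, n - 1
--     for i in range(1, n):
--         if i % 2 == 1:
--             chairs[right] = persons[i]
--             right -= 1
--         else:
--             chairs[left] = persons[i]
--             left += 1
--     return chairs
-- ===== SOURCE B (Python) =====
-- def manage_seating(persons):
--     # even-indexed persons fill the front left-to-right, odd-indexed fill the back toward the center
--     return list(persons[0::2]) + list(persons[1::2])[::-1]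
-- ===== Notes on version B (the rewrite author's own statement) =====
-- stated objective: simpler
-- what changed: Replaces the index-juggling loop over a preallocated chair array (two moving cursors) by two step-2 slices: even-indexed persons taken in order plus odd-indexed persons reversed.
-- crash fix: On the empty list A raises IndexError (persons[0]); B returns []. — e.g. on manage_seating([]): A raises IndexError, B returns []
import Mathlib
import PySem

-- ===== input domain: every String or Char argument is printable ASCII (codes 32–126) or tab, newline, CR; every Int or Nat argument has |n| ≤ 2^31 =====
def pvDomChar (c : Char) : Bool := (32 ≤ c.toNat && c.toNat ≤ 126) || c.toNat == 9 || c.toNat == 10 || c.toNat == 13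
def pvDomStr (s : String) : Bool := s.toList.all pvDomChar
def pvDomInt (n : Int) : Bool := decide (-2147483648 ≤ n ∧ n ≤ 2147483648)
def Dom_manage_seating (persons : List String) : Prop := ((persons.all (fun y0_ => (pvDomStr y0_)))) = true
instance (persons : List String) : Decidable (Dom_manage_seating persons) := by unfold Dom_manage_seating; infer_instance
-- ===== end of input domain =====

-- B replaces A's two-cursor loop over a preallocated chair array by two step-2 slices
-- (even-indexed persons in order ++ odd-indexed persons reversed); simpler decomposition, same cost.

-- ===== PORT A =====
-- A's for-loop as structural recursion on the remaining indices (i counts up to n)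
def pvLoopA (persons : List String) (n : ℕ) (i left right : ℕ) (chairs : List String) :
    List String :=
  if _h : i < n then
    if i % 2 = 1 then
      pvLoopA persons n (i + 1) left (right - 1) (chairs.set right (persons.getD i ""))
    else
      pvLoopA persons n (i + 1) (left + 1) right (chairs.set left (persons.getD i ""))
  else chairs
termination_by n - i

def manage_seating (persons : List String) : List String :=
  let n := persons.length
  let chairs := List.replicate n ""
  -- chairs[0] = persons[0]: IndexError on the empty list, excluded by Pre_
  let chairs := chairs.set 0 (persons.getD 0 "")
  pvLoopA persons n 1 1 (n - 1) chairs

-- ===== PORT B =====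
-- hand port of the step-2 slice xs[0::2] (exact: every second element starting at the head)
def pvStep2 (xs : List String) : List String :=
  match xs with
  | [] => []
  | [a] => [a]
  | a :: _ :: t => a :: pvStep2 t

def manage_seating_alt (persons : List String) : List String :=
  -- persons[0::2] + persons[1::2][::-1]  (persons[1::2] = step-2 slice of the tail)
  pvStep2 persons ++ (pvStep2 (persons.drop 1)).reverse

-- ===== PRECONDITION & SPEC =====
-- Pre_ excludes exactly the empty list, on which A raises IndexError (persons[0]).
def Pre_manage_seating (persons : List String) : Prop := persons ≠ []
instance (persons : List String) : Decidable (Pre_manage_seating persons) := by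
  unfold Pre_manage_seating; infer_instance
def pvWitness_manage_seating : List String := (["ann", "bob", "cat"])

-- On the empty list A raises IndexError (persons[0]); B returns [].
def Raises_manage_seating (persons : List String) : Prop := persons = []
instance (persons : List String) : Decidable (Raises_manage_seating persons) := by
  unfold Raises_manage_seating; infer_instance
def pvRaiseWitness_manage_seating : List String := ([])
def pvRaiseWitnessOut_manage_seating : List String := []

def Spec_manage_seating (persons : List String) (out : List String) : Prop :=
  out = manage_seating_alt persons
instance (persons : List String) (out : List String) : Decidable (Spec_manage_seating persons out) := by
  unfold Spec_manage_seating; infer_instance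

-- ===== CLAIM (what is proved, stated in full; the proofs are below) =====
def Claim_equal_manage_seating : Prop := ∀ (persons : List String), Dom_manage_seating persons → Pre_manage_seating persons → Spec_manage_seating persons (manage_seating persons)
def Claim_raises_manage_seating : Prop := (∀ (persons : List String), Dom_manage_seating persons → Raises_manage_seating persons → ¬ Pre_manage_seating persons) ∧ (Dom_manage_seating (pvRaiseWitness_manage_seating) ∧ Raises_manage_seating (pvRaiseWitness_manage_seating) ∧ manage_seating_alt (pvRaiseWitness_manage_seating) = pvRaiseWitnessOut_manage_seating)

-- ===== LEMMAS AND PROOFS =====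

lemma pvStep2_cons (a : String) (t : List String) :
    pvStep2 (a :: t) = a :: pvStep2 (t.drop 1) := by
  cases t <;> simp [pvStep2]

-- loop invariant: with E the occupied front, R the occupied back and blanks between,
-- the loop distributes the remaining persons (tail) by the parity of i.
lemma pvLoopA_inv (persons : List String) (tail : List String) :
    ∀ (E R : List String) (i : ℕ),
      persons.drop i = tail → i = E.length + R.length → i ≤ persons.length →
      1 ≤ E.length →
      pvLoopA persons persons.length i E.length (persons.length - 1 - R.length)
          (E ++ List.replicate tail.length "" ++ R)
        = if i % 2 = 1 then
            E ++ (pvStep2 (tail.drop 1)) ++ (pvStep2 tail).reverse ++ R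
          else
            E ++ pvStep2 tail ++ (pvStep2 (tail.drop 1)).reverse ++ R := by
  induction tail with
  | nil =>
    intro E R i hdrop hi hile hE
    have hlen : persons.length = i := by
      have := congrArg List.length hdrop
      simp [List.length_drop] at this
      omega
    rw [pvLoopA]
    simp [hlen, pvStep2]
  | cons a t ih =>
    intro E R i hdrop hi hile hE
    have hlen : persons.length = i + t.length + 1 := by
      have := congrArg List.length hdrop
      simp [List.length_drop] at this
      omega
    have hget : persons.getD i "" = a := by
      have h0 : persons[i]? = some a := by
        have := congrArg (fun l => l[0]?) hdrop
        simpa [List.getElem?_drop] using this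
      simp [List.getD, h0]
    have hdrop' : persons.drop (i + 1) = t := by
      have := congrArg List.tail hdrop
      simpa [List.tail_drop] using this
    have hin : i < persons.length := by omega
    rw [pvLoopA, dif_pos hin]
    by_cases hpar : i % 2 = 1
    · -- odd: a goes to the rightmost blank; new back is a :: R
      rw [if_pos hpar, hget]
      have hr : persons.length - 1 - R.length = E.length + t.length := by omega
      have hset :
          (E ++ List.replicate (t.length + 1) "" ++ R).set (E.length + t.length) a
            = E ++ List.replicate t.length "" ++ (a :: R) := by
        rw [List.append_assoc, List.set_append_right _ _ (by simp)]
        have : (List.replicate (t.length + 1) "" ++ R).set t.length a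
            = List.replicate t.length "" ++ (a :: R) := by
          rw [show List.replicate (t.length + 1) "" = List.replicate t.length "" ++ [""] by
                simp [List.replicate_succ']]
          rw [List.append_assoc, List.set_append_right _ _ (by simp)]
          simp
        simpa using this
      rw [show (a :: t).length = t.length + 1 from rfl, hr, hset]
      have hcall := ih E (a :: R) (i + 1) hdrop' (by simp; omega) (by omega) hE
      have hpar' : ¬ (i + 1) % 2 = 1 := by omega
      rw [if_neg hpar'] at hcall
      have hr' : persons.length - 1 - (a :: R).length = E.length + t.length - 1 := by
        simp; omega
      rw [hr'] at hcall
      rw [hcall, if_pos hpar, pvStep2_cons]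
      simp
    · -- even: a goes to the leftmost blank; new front is E ++ [a]
      rw [if_neg hpar, hget]
      have hset :
          (E ++ List.replicate (t.length + 1) "" ++ R).set E.length a
            = (E ++ [a]) ++ List.replicate t.length "" ++ R := by
        rw [List.append_assoc, List.set_append_right _ _ (le_refl _)]
        simp [List.replicate_succ]
      rw [show (a :: t).length = t.length + 1 from rfl, hset]
      have hcall := ih (E ++ [a]) R (i + 1) hdrop' (by simp; omega) (by omega) (by simp)
      have hpar' : (i + 1) % 2 = 1 := by omega
      rw [if_pos hpar'] at hcall
      have hE' : (E ++ [a]).length = E.length + 1 := by simp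
      rw [hE'] at hcall
      have harg : E.length + 1 = E.length + 1 := rfl
      rw [hcall, if_neg hpar, pvStep2_cons]
      simp

-- ===== VERDICT (by name: the statement is the Claim_ definition above) =====
theorem manage_seating_spec : Claim_equal_manage_seating := by
  intro persons _hdom hpre
  unfold Spec_manage_seating manage_seating manage_seating_alt
  obtain ⟨p, ps, rfl⟩ := List.exists_cons_of_ne_nil hpre
  have hinv := pvLoopA_inv (p :: ps) ps [p] [] 1 (by simp) (by simp) (by simp) (by simp)
  norm_num at hinv
  simpa [pvStep2_cons, List.replicate_succ, List.getD] using hinv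

theorem manage_seating_raises : Claim_raises_manage_seating := by
  unfold Claim_raises_manage_seating
  exact ⟨fun persons _ h => by simp [Pre_manage_seating]; exact h, by decide⟩

-- self-check: the raise witness really is mapped to the stated literal by B's port
theorem pvRaiseWitness_ok :
    manage_seating_alt pvRaiseWitness_manage_seating = pvRaiseWitnessOut_manage_seating :=
  manage_seating_raises.2.2.2
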